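-- pv_equiv track=rewrite | github.com/marcinnowakowski/boolean_bayesian_networks | boolean_networks/function_exctactor/truth_table_2_functions.py | _apply_absorption
-- ===== SOURCE A (Python) =====
-- from typing import Dict, List, Set, Tuple
--
-- def _apply_absorption(terms: List[Set[str]]) -> List[Set[str]]:
--     """Apply absorption law: A | (A & B) = A"""
--     result = []
--     for term in terms:
--         absorbed = False
--         for other in terms:
--             if term != other and other.issubset(term):
--                 absorbed = True
--                 break
--         if not absorbed:
--             result.append(term)
--     return result
-- ===== SOURCE B (Python) =====
-- from typing import Dict, List, Set, Tuple
--
-- def _apply_absorption(terms: List[Set[str]]) -> List[Set[str]]: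
--     """Apply absorption law: A | (A & B) = A.
--
--     Sort the terms once by size ascending; a term is absorbed iff some
--     strictly smaller term is a subset of it, so the scan over the sorted
--     list can stop as soon as it reaches terms of equal or larger size.
--     """
--     by_size = sorted(terms, key=len)
--
--     def absorbed(t):
--         for s in by_size:
--             if len(s) >= len(t):
--                 return False
--             if s.issubset(t):
--                 return True
--         return False
--
--     return [t for t in terms if not absorbed(t)]
-- ===== Notes on version B (the rewrite author's own statement) =====
-- stated objective: alternative
-- what changed: B sorts the terms once by size ascending and decides absorption by scanning only the strictly smaller terms (cutting each scan off at the first equal-or-larger term, using a strict-size subset test instead of A's set-inequality-plus-subset test over the whole list), then emits survivors by filtering the original list in order.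
import Mathlib
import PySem

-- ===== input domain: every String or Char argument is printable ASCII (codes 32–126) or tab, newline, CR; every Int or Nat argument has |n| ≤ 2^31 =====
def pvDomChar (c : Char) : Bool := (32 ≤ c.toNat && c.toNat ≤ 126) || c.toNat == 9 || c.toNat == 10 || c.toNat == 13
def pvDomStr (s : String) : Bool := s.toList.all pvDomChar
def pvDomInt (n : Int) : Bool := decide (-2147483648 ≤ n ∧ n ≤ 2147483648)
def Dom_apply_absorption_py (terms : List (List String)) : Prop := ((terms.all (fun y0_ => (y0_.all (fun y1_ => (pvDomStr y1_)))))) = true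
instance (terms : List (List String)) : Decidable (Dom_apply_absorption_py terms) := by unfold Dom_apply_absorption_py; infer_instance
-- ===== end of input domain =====

-- B sorts the terms once by size and stops each absorption scan at the first
-- equal-or-larger term (a strictly smaller subset test replaces A's
-- inequality-plus-subset test over the whole list); objective: alternative.

-- ===== PORT A =====
-- inner 'for other in terms: … break' loop of A (first match wins)
def pvAbsorbedA (term : List String) : List (List String) → Bool
  | [] => false
  | other :: rest =>
      if !PySem.Set.equal term other && PySem.Set.issubset other term then true
      else pvAbsorbedA term rest

def apply_absorption_py (terms : List (List String)) : List (List String) :=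
  terms.foldl (fun result term =>
    if !pvAbsorbedA term terms then result ++ [term] else result) []

-- ===== PORT B =====
-- B's 'absorbed' scan over the size-sorted list, cut off at len(s) >= len(t)
def pvAbsorbedB (t : List String) : List (List String) → Bool
  | [] => false
  | s :: rest =>
      if t.length ≤ s.length then false
      else if PySem.Set.issubset s t then true
      else pvAbsorbedB t rest

def apply_absorption_py_alt (terms : List (List String)) : List (List String) :=
  let bySize := PySem.List.sorted terms (fun s => s.length) false
  terms.filter (fun t => !pvAbsorbedB t bySize)

-- ===== PRECONDITION & SPEC =====
-- Pre_ is only the representation invariant of the Python argument type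
-- List[Set[str]] under the type convention (each inner list holds the DISTINCT
-- elements of a set); it excludes no input the Python function receives.
def Pre_apply_absorption_py (terms : List (List String)) : Prop :=
  ∀ t ∈ terms, t.Nodup
instance (terms : List (List String)) : Decidable (Pre_apply_absorption_py terms) := by
  unfold Pre_apply_absorption_py; infer_instance

def pvWitness_apply_absorption_py : List (List String) :=
  [["a", "b"], ["a"], ["b", "c"]]

def Spec_apply_absorption_py (terms : List (List String)) (out : List (List String)) : Prop := out = apply_absorption_py_alt terms
instance (terms : List (List String)) (out : List (List String)) : Decidable (Spec_apply_absorption_py terms out) := by unfold Spec_apply_absorption_py; infer_instance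

-- ===== CLAIM (what is proved, stated in full; the proofs are below) =====
def Claim_equal_apply_absorption_py : Prop := ∀ (terms : List (List String)), Dom_apply_absorption_py terms → Pre_apply_absorption_py terms → Spec_apply_absorption_py terms (apply_absorption_py terms)

-- ===== LEMMAS AND PROOFS =====

-- A's break-scan is List.any of its test
theorem pvAbsorbedA_eq_any (term : List String) (l : List (List String)) :
    pvAbsorbedA term l
      = l.any (fun s => !PySem.Set.equal term s && PySem.Set.issubset s term) := by
  induction l with
  | nil => rfl
  | cons s rest ih =>
      by_cases h : (!PySem.Set.equal term s && PySem.Set.issubset s term) = true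
      · simp [pvAbsorbedA, h]
      · simp only [Bool.not_eq_true] at h
        simp [pvAbsorbedA, h, ih]

-- on Nodup representatives, A's test (other ≠ term as sets, other ⊆ term)
-- equals B's test (|other| < |term|, other ⊆ term)
theorem test_eq (term s : List String) (ht : term.Nodup) (hs : s.Nodup) :
    (!PySem.Set.equal term s && PySem.Set.issubset s term)
      = (decide (s.length < term.length) && PySem.Set.issubset s term) := by
  cases hsub : PySem.Set.issubset s term with
  | false => simp
  | true =>
    simp only [Bool.and_true]
    have hsubset : ∀ x ∈ s, x ∈ term := (PySem.Set.issubset_iff s term).mp hsub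
    have hfs : s.toFinset ⊆ term.toFinset := by
      intro x hx
      simp only [List.mem_toFinset] at *
      exact hsubset x hx
    have hcard : s.length ≤ term.length := by
      have h := Finset.card_le_card hfs
      rwa [List.toFinset_card_of_nodup hs, List.toFinset_card_of_nodup ht] at h
    by_cases hlt : s.length < term.length
    · have heq : PySem.Set.equal term s = false := by
        cases he : PySem.Set.equal term s
        · rfl
        · exfalso
          have hiff := (PySem.Set.equal_iff term s).mp he
          have hperm : term.Perm s :=
            (List.perm_ext_iff_of_nodup ht hs).mpr (fun x => hiff x)
          have := hperm.length_eq
          omega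
      simp [heq, hlt]
    · have hfin : s.toFinset = term.toFinset := by
        apply Finset.eq_of_subset_of_card_le hfs
        rw [List.toFinset_card_of_nodup hs, List.toFinset_card_of_nodup ht]
        omega
      have heq : PySem.Set.equal term s = true := by
        apply (PySem.Set.equal_iff term s).mpr
        intro x
        constructor
        · intro hx
          have hx' : x ∈ term.toFinset := List.mem_toFinset.mpr hx
          rw [← hfin] at hx'
          exact List.mem_toFinset.mp hx'
        · intro hx; exact hsubset x hx
      simp [heq, hlt]

-- B's cutoff scan over a size-sorted list is List.any of the strict test
theorem pvAbsorbedB_eq_any (t : List String) (l : List (List String))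
    (hsorted : l.Pairwise (fun a b => a.length ≤ b.length)) :
    pvAbsorbedB t l
      = l.any (fun s => decide (s.length < t.length) && PySem.Set.issubset s t) := by
  induction l with
  | nil => rfl
  | cons s rest ih =>
      rcases List.pairwise_cons.mp hsorted with ⟨hhead, htail⟩
      by_cases hle : t.length ≤ s.length
      · have hall : ∀ x ∈ s :: rest, ¬ x.length < t.length := by
          intro x hx
          rcases List.mem_cons.mp hx with rfl | hx'
          · omega
          · have := hhead x hx'; omega
        simp only [pvAbsorbedB, if_pos hle]
        symm
        rw [List.any_eq_false]
        intro x hx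
        simp [hall x hx]
      · have hlt : s.length < t.length := by omega
        by_cases hsub : PySem.Set.issubset s t = true
        · simp [pvAbsorbedB, hle, hsub, hlt]
        · simp only [Bool.not_eq_true] at hsub
          simp [pvAbsorbedB, hle, hsub, ih htail, hlt]

-- any is invariant under a permutation of the list
theorem any_eq_of_perm {α : Type} {l₁ l₂ : List α} (h : l₁.Perm l₂) (p : α → Bool) :
    l₁.any p = l₂.any p := by
  cases h2 : l₂.any p
  · rw [List.any_eq_false] at h2 ⊢
    intro x hx
    exact h2 x (h.mem_iff.mp hx)
  · rw [List.any_eq_true] at h2 ⊢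
    rcases h2 with ⟨x, hx, hp⟩
    exact ⟨x, h.mem_iff.mpr hx, hp⟩

-- any is determined by the test's value on the members
theorem any_congr_mem {α : Type} (l : List α) (p q : α → Bool)
    (h : ∀ x ∈ l, p x = q x) : l.any p = l.any q := by
  induction l with
  | nil => rfl
  | cons x rest ih =>
      simp only [List.any_cons, h x (List.mem_cons_self), ih (fun y hy => h y (List.mem_cons_of_mem _ hy))]

-- ===== VERDICT (by name: the statement is the Claim_ definition above) =====
theorem apply_absorption_py_spec : Claim_equal_apply_absorption_py := by
  intro terms _ hpre
  unfold Spec_apply_absorption_py apply_absorption_py apply_absorption_py_alt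
  rw [PySem.List.foldl_append_if_eq_filter]
  simp only [List.nil_append]
  apply List.filter_congr
  intro t ht
  have ht' : t.Nodup := hpre t ht
  have hperm : (PySem.List.sorted terms (fun s => s.length) false).Perm terms :=
    PySem.List.sorted_perm terms (fun s => s.length) false
  rw [pvAbsorbedA_eq_any,
      pvAbsorbedB_eq_any t _ (PySem.List.sorted_pairwise terms (fun s => s.length)),
      any_eq_of_perm hperm,
      any_congr_mem terms _ _ (fun s hs => (test_eq t s ht' (hpre s hs)).symm)]
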